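-- pv_equiv track=rewrite | github.com/theo-pannethier/CS_Dev_pendu | jeu.py | mot_cache
-- ===== SOURCE A (Python) =====
-- def mot_cache(pMot_final):
--     """programme permettant de dissimuler le mot à trouver
--         Entrée : Mot choisi par la fonction selection_mot str
--         Sortie: Mot dissimuler à trouver en str
--         """
--     Mot_cache= pMot_final[0]
--     lettres_restantes=len(pMot_final)-1
--
--     for i in range (1,len(pMot_final)):
--             if  pMot_final[i] != pMot_final[0]:
--                 Mot_cache= Mot_cache + "_ "
--             else:
--                 Mot_cache=Mot_cache + pMot_final[0]
--                 lettres_restantes -= 1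
--     print (Mot_cache)
--     return(Mot_cache,lettres_restantes)
-- ===== SOURCE B (Python) =====
-- def mot_cache(pMot_final):
--     first = pMot_final[0]
--     parts = pMot_final[1:].split(first)
--     Mot_cache = first + first.join('_ ' * len(p) for p in parts)
--     lettres_restantes = sum(len(p) for p in parts)
--     print(Mot_cache)
--     return (Mot_cache, lettres_restantes)
-- ===== Notes on version B (the rewrite author's own statement) =====
-- stated objective: alternative
-- what changed: Replaces A's per-character fused build-and-decrement loop by splitting the tail on the first letter: each segment is masked wholesale by repeating the two-character blank, the pieces are rejoined with the first letter, and the remaining-letter count is the sum of the segment lengths.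
import Mathlib
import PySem

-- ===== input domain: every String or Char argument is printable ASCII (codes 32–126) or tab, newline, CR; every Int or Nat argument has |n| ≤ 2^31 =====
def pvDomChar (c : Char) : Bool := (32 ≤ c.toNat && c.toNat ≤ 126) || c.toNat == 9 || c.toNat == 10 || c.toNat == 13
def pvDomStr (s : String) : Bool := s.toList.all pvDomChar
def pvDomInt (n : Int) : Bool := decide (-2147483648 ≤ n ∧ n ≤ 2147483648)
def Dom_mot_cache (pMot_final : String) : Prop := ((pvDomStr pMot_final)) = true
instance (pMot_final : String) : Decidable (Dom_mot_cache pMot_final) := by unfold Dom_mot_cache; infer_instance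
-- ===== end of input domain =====

-- B splits the tail on the first letter and rebuilds the mask from the segments (the two-character
-- blank repeated per segment, rejoined with the first letter), counting remaining letters as the
-- sum of segment lengths, instead of A's per-character fused build-and-decrement loop
-- ('alternative').
-- A prints Mot_cache as a side effect; the equivalence proved here is about the return value only
-- (B performs the same print in Python).

-- ===== PORT A =====
def mot_cache (pMot_final : String) : String × Int :=
  match PySem.Str.pyGet? pMot_final 0 with
  | none => ("", 0)  -- pMot_final[0] raises IndexError on the empty string; excluded by Pre_
  | some c0 =>
    let cs := pMot_final.toList
    let r := (PySem.List.pyRange 1 (cs.length : Int) 1).foldl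
      (fun (st : List Char × Int) i =>
        if PySem.List.pyGetD cs i c0 ≠ c0 then (st.1 ++ ['_', ' '], st.2)
        else (st.1 ++ [c0], st.2 - 1))
      ([c0], (cs.length : Int) - 1)
    (String.ofList r.1, r.2)

-- ===== PORT B =====
def mot_cache_alt (pMot_final : String) : String × Int :=
  match pMot_final.toList with
  | [] => ("", 0)  -- pMot_final[0] raises IndexError on the empty string; excluded by Pre_
  | c0 :: _ =>
    let parts := PySem.Chars.splitOn (PySem.List.slice pMot_final.toList (some 1) none) [c0]
    let masked := c0 :: PySem.Chars.join [c0]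
      (parts.map (fun p => PySem.List.pyRepeat ['_', ' '] (p.length : Int)))
    (String.ofList masked, parts.foldl (fun acc p => acc + (p.length : Int)) 0)

-- ===== PRECONDITION & SPEC =====
-- A (and B alike) raises IndexError on the empty string; only that input is excluded.
def Pre_mot_cache (pMot_final : String) : Prop := pMot_final ≠ ""
instance (pMot_final : String) : Decidable (Pre_mot_cache pMot_final) := by unfold Pre_mot_cache; infer_instance
def pvWitness_mot_cache : String := "banana"

def Spec_mot_cache (pMot_final : String) (out : String × Int) : Prop := out = mot_cache_alt pMot_final
instance (pMot_final : String) (out : String × Int) : Decidable (Spec_mot_cache pMot_final out) := by unfold Spec_mot_cache; infer_instance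

-- ===== CLAIM =====
def Claim_equal_mot_cache : Prop := ∀ (pMot_final : String), Dom_mot_cache pMot_final → Pre_mot_cache pMot_final → Spec_mot_cache pMot_final (mot_cache pMot_final)

-- ===== LEMMAS AND PROOFS =====

-- A's fused loop, characterised: mask chars appended via flatMap, counter decremented by count.
theorem motcache_loop_char (c0 : Char) (rest : List Char) (acc : List Char) (k : Int) :
    rest.foldl
      (fun (st : List Char × Int) c =>
        if c ≠ c0 then (st.1 ++ ['_', ' '], st.2) else (st.1 ++ [c0], st.2 - 1))
      (acc, k)
    = (acc ++ rest.flatMap (fun c => if c = c0 then [c0] else ['_', ' ']),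
       k - (rest.count c0 : Int)) := by
  induction rest generalizing acc k with
  | nil => simp
  | cons h t ih =>
    simp only [List.foldl_cons]
    by_cases hc : h = c0
    · rw [if_neg (by simp [hc]), ih]
      subst hc
      simp [List.flatMap]
      ring
    · rw [if_pos hc, ih]
      simp [hc, List.flatMap]

-- A simple structural model of str.split for a single-character separator.
def split1 (l : List Char) (c : Char) : List (List Char) :=
  match l with
  | [] => [[]]
  | x :: t =>
    if x = c then [] :: split1 t c
    else
      match split1 t c with
      | [] => [[x]]
      | p :: ps => (x :: p) :: ps

theorem split1_ne_nil (l : List Char) (c : Char) : split1 l c ≠ [] := by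
  cases l with
  | nil => simp [split1]
  | cons x t =>
    simp only [split1]
    split_ifs with h
    · simp
    · cases split1 t c <;> simp

-- PySem's fueled splitOn agrees with the structural model (single-char separator).
theorem splitOn_go_eq (c0 : Char) (fuel : Nat) (l cur : List Char) (acc : List (List Char))
    (h : l.length < fuel) :
    PySem.Chars.splitOn.go [c0] fuel l cur acc
      = acc.reverse ++
        (match split1 l c0 with
         | [] => [cur.reverse]
         | p :: ps => (cur.reverse ++ p) :: ps) := by
  induction fuel generalizing l cur acc with
  | zero => omega
  | succ f ih =>
    cases l with
    | nil => simp [PySem.Chars.splitOn.go, split1]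
    | cons x t =>
      by_cases hx : x = c0
      · subst hx
        rw [show PySem.Chars.splitOn.go [x] (f + 1) (x :: t) cur acc
              = PySem.Chars.splitOn.go [x] f (List.drop 1 (x :: t)) [] (cur.reverse :: acc) by
            simp [PySem.Chars.splitOn.go, List.isPrefixOf]]
        simp only [List.drop_one, List.tail_cons]
        rw [ih t [] (cur.reverse :: acc) (by simpa using Nat.lt_of_succ_lt_succ h)]
        have hne := split1_ne_nil t x
        cases hs : split1 t x with
        | nil => exact absurd hs hne
        | cons p ps => simp [split1, hs]
      · rw [show PySem.Chars.splitOn.go [c0] (f + 1) (x :: t) cur acc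
              = PySem.Chars.splitOn.go [c0] f t (x :: cur) acc by
            simp [PySem.Chars.splitOn.go, List.isPrefixOf,
              show ¬ c0 = x from fun he => hx he.symm]]
        rw [ih t (x :: cur) acc (by simpa using Nat.lt_of_succ_lt_succ h)]
        have := split1_ne_nil t c0
        cases hs : split1 t c0 with
        | nil => exact absurd hs this
        | cons p ps => simp [split1, hx, hs]

theorem splitOn_eq_split1 (l : List Char) (c0 : Char) :
    PySem.Chars.splitOn l [c0] = split1 l c0 := by
  unfold PySem.Chars.splitOn
  rw [splitOn_go_eq c0 (l.length + 1) l [] [] (by omega)]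
  have := split1_ne_nil l c0
  cases hs : split1 l c0 with
  | nil => exact absurd hs this
  | cons p ps => simp

-- Rebuilding the mask from the segments equals the per-character flatMap mask.
theorem join_cons_of_ne_nil (sep a : List Char) (parts : List (List Char)) (h : parts ≠ []) :
    PySem.Chars.join sep (a :: parts) = a ++ sep ++ PySem.Chars.join sep parts := by
  cases parts with
  | nil => exact absurd rfl h
  | cons q qs => rw [PySem.Chars.join_cons_cons]

theorem join_cons_append (sep u v : List Char) (rest : List (List Char)) :
    PySem.Chars.join sep ((u ++ v) :: rest) = u ++ PySem.Chars.join sep (v :: rest) := by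
  cases rest with
  | nil => rw [PySem.Chars.join_singleton, PySem.Chars.join_singleton]
  | cons q qs =>
    rw [PySem.Chars.join_cons_cons, PySem.Chars.join_cons_cons]
    simp [List.append_assoc]

-- Rebuilding the mask from the segments equals the per-character flatMap mask.
theorem join_split1_mask (t : List Char) (c0 : Char) :
    PySem.Chars.join [c0]
      ((split1 t c0).map (fun p => PySem.List.pyRepeat ['_', ' '] (p.length : Int)))
    = t.flatMap (fun c => if c = c0 then [c0] else ['_', ' ']) := by
  induction t with
  | nil => simp [split1, PySem.Chars.join_singleton, PySem.List.pyRepeat]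
  | cons x t ih =>
    by_cases hx : x = c0
    · subst hx
      rw [show split1 (x :: t) x = [] :: split1 t x from by simp [split1], List.map_cons,
        join_cons_of_ne_nil _ _ _
          (fun hm => split1_ne_nil t x (List.map_eq_nil_iff.mp hm)), ih]
      simp [PySem.List.pyRepeat]
    · cases hs : split1 t c0 with
      | nil => exact absurd hs (split1_ne_nil t c0)
      | cons p ps =>
        rw [show split1 (x :: t) c0 = (x :: p) :: ps from by simp [split1, hx, hs],
          List.map_cons,
          show PySem.List.pyRepeat ['_', ' '] (((x :: p).length : Nat) : Int)
              = ['_', ' '] ++ PySem.List.pyRepeat ['_', ' '] ((p.length : Nat) : Int) from by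
            simp [PySem.List.pyRepeat, List.replicate_succ],
          join_cons_append]
        have ih' := ih
        rw [hs, List.map_cons] at ih'
        rw [ih']
        simp [List.flatMap_cons, hx]

-- The sum of segment lengths equals length minus separator count.
theorem foldl_len_add (ps : List (List Char)) (b d : Int) :
    ps.foldl (fun acc q => acc + (q.length : Int)) (b + d)
      = ps.foldl (fun acc q => acc + (q.length : Int)) b + d := by
  induction ps generalizing b with
  | nil => simp
  | cons q qs ihq =>
    simp only [List.foldl_cons]
    rw [show b + d + (q.length : Int) = b + (q.length : Int) + d by ring, ihq]

theorem split1_sum_len (t : List Char) (c0 : Char) (a : Int) :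
    (split1 t c0).foldl (fun acc p => acc + (p.length : Int)) a
      = a + (t.length : Int) - (t.count c0 : Int) := by
  induction t generalizing a with
  | nil => simp [split1]
  | cons x t ih =>
    by_cases hx : x = c0
    · subst hx
      rw [show split1 (x :: t) x = [] :: split1 t x from by simp [split1],
        List.foldl_cons, ih]
      simp
      ring
    · have := split1_ne_nil t c0
      cases hs : split1 t c0 with
      | nil => exact absurd hs this
      | cons p ps =>
        simp only [split1, if_neg hx, hs, List.foldl_cons]
        have h2 := ih a
        rw [hs] at h2
        simp only [List.foldl_cons] at h2
        rw [show a + ((x :: p).length : Int) = (a + (p.length : Int)) + 1 by push_cast [List.length_cons]; ring,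
          foldl_len_add, h2]
        simp [hx]
        push_cast
        ring

theorem mot_cache_agrees (s : String) (h : s ≠ "") :
    mot_cache s = mot_cache_alt s := by
  obtain ⟨c0, rest, hcs⟩ : ∃ c0 rest, s.toList = c0 :: rest := by
    cases hl : s.toList with
    | nil => exact absurd (by simpa using hl) h
    | cons a t => exact ⟨a, t, rfl⟩
  unfold mot_cache mot_cache_alt
  rw [show PySem.Str.pyGet? s 0 = some c0 by simp [hcs]]
  simp only [hcs]
  rw [show ((c0 :: rest).length : Int) = PySem.List.len (c0 :: rest) by simp [PySem.List.len]]
  rw [PySem.List.foldl_pyRange_pyGetD (c0 :: rest) c0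
        (fun (st : List Char × Int) c =>
          if c ≠ c0 then (st.1 ++ ['_', ' '], st.2) else (st.1 ++ [c0], st.2 - 1))
        ([c0], PySem.List.len (c0 :: rest) - 1) (by norm_num)]
  simp only [Int.toNat_one, List.drop_one, List.tail_cons]
  rw [motcache_loop_char]
  rw [show PySem.List.slice (c0 :: rest) (some 1) none = rest by
        simp [PySem.List.slice_from]]
  rw [splitOn_eq_split1, join_split1_mask, split1_sum_len]
  simp [PySem.List.len]

-- ===== VERDICT =====
theorem mot_cache_spec : Claim_equal_mot_cache := by
  intro s _ hpre
  unfold Spec_mot_cache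
  exact mot_cache_agrees s hpre
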